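-- pv_equiv track=rewrite | github.com/jk-jung/problem-solving | codewars/6kyu/6_Simple Fun #210: Maximize Points.py | maximize_points
-- ===== SOURCE A (Python) =====
-- def maximize_points(b, a):
--     a = sorted(a)
--     b = sorted(b)
--     r = 0
--     for x in a:
--         while b and b[0] <= x: b.pop(0)
--         if b:
--             r += 1
--             b.pop(0)
--     return r
-- ===== SOURCE B (Python) =====
-- def maximize_points(b, a):
--     sb = sorted(b)
--     n = len(sb)
--     j = 0
--     r = 0
--     for x in sorted(a):
--         while j < n and sb[j] <= x:
--             j += 1
--         if j < n:
--             r += 1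
--             j += 1
--     return r
-- ===== Notes on version B (the rewrite author's own statement) =====
-- stated objective: faster
-- what changed: Replaced the destructive pop(0)-from-the-front loop over a shrinking list with a single index pointer advancing over the sorted array, removing the O(n) cost of each pop.
import Mathlib
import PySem

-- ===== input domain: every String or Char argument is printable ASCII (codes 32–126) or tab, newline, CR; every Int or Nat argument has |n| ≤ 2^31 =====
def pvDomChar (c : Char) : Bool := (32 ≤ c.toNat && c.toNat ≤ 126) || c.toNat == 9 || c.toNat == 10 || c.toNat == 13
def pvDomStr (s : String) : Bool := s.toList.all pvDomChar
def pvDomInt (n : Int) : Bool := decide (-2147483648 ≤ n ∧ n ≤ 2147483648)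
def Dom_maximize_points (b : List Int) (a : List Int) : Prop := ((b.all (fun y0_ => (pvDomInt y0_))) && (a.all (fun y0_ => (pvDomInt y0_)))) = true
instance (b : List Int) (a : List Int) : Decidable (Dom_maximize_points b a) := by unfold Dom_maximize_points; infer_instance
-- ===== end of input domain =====

-- B replaces A's quadratic pop(0)-based greedy with a sorted-array index-pointer scan (faster).

-- ===== PORT A =====
-- the loop over sorted a, carrying the mutable list b and the counter r
def mpLoopA : List Int → List Int → Int → Int
  | [], _, r => r
  | x :: xs, bs, r =>
    -- 'while b and b[0] <= x: b.pop(0)'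
    match bs.dropWhile (fun y => decide (y ≤ x)) with
    | [] => mpLoopA xs [] r
    | _ :: rest => mpLoopA xs rest (r + 1)   -- 'if b: r += 1; b.pop(0)'

def maximize_points (b : List Int) (a : List Int) : Int :=
  mpLoopA (PySem.List.sorted a (fun x => x)) (PySem.List.sorted b (fun x => x)) 0

-- ===== PORT B =====
-- 'while j < n and sb[j] <= x: j += 1'
def mpAdvance (sb : List Int) (x : Int) (j : Nat) : Nat :=
  if h : j < sb.length then
    if sb[j] ≤ x then mpAdvance sb x (j + 1) else j
  else j
termination_by sb.length - j

-- the for-loop over sorted a, carrying the index j and the counter r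
def mpLoopB (sb : List Int) : List Int → Nat → Int → Int
  | [], _, r => r
  | x :: xs, j, r =>
    let j' := mpAdvance sb x j
    if j' < sb.length then mpLoopB sb xs (j' + 1) (r + 1)
    else mpLoopB sb xs j' r

def maximize_points_alt (b : List Int) (a : List Int) : Int :=
  mpLoopB (PySem.List.sorted b (fun x => x)) (PySem.List.sorted a (fun x => x)) 0 0

-- ===== PRECONDITION & SPEC =====
def Spec_maximize_points (b : List Int) (a : List Int) (out : Int) : Prop := out = maximize_points_alt b a
instance (b : List Int) (a : List Int) (out : Int) : Decidable (Spec_maximize_points b a out) := by unfold Spec_maximize_points; infer_instance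

-- ===== CLAIM (what is proved, stated in full; the proofs are below) =====
def Claim_equal_maximize_points : Prop := ∀ (b : List Int) (a : List Int), Dom_maximize_points b a → Spec_maximize_points b a (maximize_points b a)

-- ===== LEMMAS AND PROOFS =====

-- advancing the index corresponds to dropWhile on the suffix
theorem mpAdvance_drop (sb : List Int) (x : Int) (j : Nat) :
    sb.drop (mpAdvance sb x j) = (sb.drop j).dropWhile (fun y => decide (y ≤ x)) := by
  unfold mpAdvance
  split
  · rename_i h
    split
    · rename_i hle
      rw [mpAdvance_drop sb x (j + 1), List.drop_eq_getElem_cons h, List.dropWhile_cons]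
      simp [hle]
    · rename_i hgt
      rw [List.drop_eq_getElem_cons h, List.dropWhile_cons]
      simp [hgt]
  · rename_i h
    rw [List.drop_eq_nil_of_le (by omega)]
    rfl
termination_by sb.length - j

-- the index-pointer loop computes the same as the pop-based loop on the remaining suffix
theorem mpLoopB_eq (sb : List Int) (xs : List Int) (j : Nat) (r : Int) :
    mpLoopB sb xs j r = mpLoopA xs (sb.drop j) r := by
  induction xs generalizing j r with
  | nil => simp [mpLoopA, mpLoopB]
  | cons x xs ih =>
    simp only [mpLoopB, mpLoopA, ← mpAdvance_drop sb x j]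
    by_cases h : mpAdvance sb x j < sb.length
    · rw [List.drop_eq_getElem_cons h]
      simp only [h, if_true, ih]
    · have he : sb.drop (mpAdvance sb x j) = [] := List.drop_eq_nil_of_le (by omega)
      rw [he]
      simp only [h, if_false, ih, he]

-- ===== VERDICT (by name: the statement is the Claim_ definition above) =====
theorem maximize_points_spec : Claim_equal_maximize_points := by
  intro b a _
  unfold Spec_maximize_points maximize_points maximize_points_alt
  rw [mpLoopB_eq]
  rfl
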